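-- pv_equiv track=rewrite | github.com/ihanwen99/vldb26-demo | qubo_construction/index_selection_qubo.py | binary_storage_fractions
-- ===== SOURCE A (Python) =====
-- from typing import Dict, Iterable, List, Tuple
--
-- def binary_storage_fractions(storage_bound: int) -> List[int]:
--     fractions: List[int] = []
--     remaining = storage_bound
--     current = 1
--     while remaining > 0:
--         fraction = min(current, remaining)
--         fractions.append(fraction)
--         remaining -= fraction
--         current *= 2
--     return fractions
-- ===== SOURCE B (Python) =====
-- from typing import Dict, Iterable, List, Tuple
--
-- def binary_storage_fractions(storage_bound: int) -> List[int]: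
--     if storage_bound <= 0:
--         return []
--     k = (storage_bound + 1).bit_length() - 1
--     fractions = [1 << i for i in range(k)]
--     rem = storage_bound - ((1 << k) - 1)
--     if rem > 0:
--         fractions.append(rem)
--     return fractions
-- ===== Notes on version B (the rewrite author's own statement) =====
-- stated objective: simpler
-- what changed: Replaces the iterative min/subtract halving loop with a closed form: the bit length of the successor of the bound gives the count k of full powers, the result is the powers of two below 2^k plus the positive remainder, if any.
import Mathlib
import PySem

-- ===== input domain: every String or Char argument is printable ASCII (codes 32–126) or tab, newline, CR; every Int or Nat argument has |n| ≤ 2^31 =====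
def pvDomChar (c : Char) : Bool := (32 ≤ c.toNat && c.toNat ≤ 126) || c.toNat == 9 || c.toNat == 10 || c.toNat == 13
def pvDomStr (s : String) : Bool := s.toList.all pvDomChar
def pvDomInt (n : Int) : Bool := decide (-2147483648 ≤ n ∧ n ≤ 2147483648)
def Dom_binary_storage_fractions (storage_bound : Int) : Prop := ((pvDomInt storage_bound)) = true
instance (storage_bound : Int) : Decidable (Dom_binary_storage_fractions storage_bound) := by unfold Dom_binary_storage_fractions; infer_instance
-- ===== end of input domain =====

-- B computes the same list in closed form (powers of two plus remainder) instead of A's min/subtract loop.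

-- ===== PORT A =====
-- A's while loop; fuel = storage_bound.toNat + 1 only makes the recursion total
-- (the loop runs at most remaining.toNat times since current ≥ 1 throughout).
def pvLoopA : Nat → Int → Int → List Int
  | 0, _, _ => []
  | fuel + 1, remaining, current =>
    if remaining > 0 then
      let fraction := min current remaining
      fraction :: pvLoopA fuel (remaining - fraction) (current * 2)
    else []

def binary_storage_fractions (storage_bound : Int) : List Int :=
  pvLoopA (storage_bound.toNat + 1) storage_bound 1

-- ===== PORT B =====
-- Python's m.bit_length() for m ≥ 0 (exact there: 0 for 0, otherwise ⌊log2 m⌋ + 1).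
def pvBitLength (m : Int) : Nat := if m ≤ 0 then 0 else Nat.log2 m.toNat + 1

def binary_storage_fractions_alt (storage_bound : Int) : List Int :=
  if storage_bound ≤ 0 then []
  else
    let k := pvBitLength (storage_bound + 1) - 1
    let fractions := (List.range k).map (fun i => (2 : Int) ^ i)
    let rem := storage_bound - ((2 : Int) ^ k - 1)
    if rem > 0 then fractions ++ [rem] else fractions

-- ===== PRECONDITION & SPEC =====
def Spec_binary_storage_fractions (storage_bound : Int) (out : List Int) : Prop := out = binary_storage_fractions_alt storage_bound
instance (storage_bound : Int) (out : List Int) : Decidable (Spec_binary_storage_fractions storage_bound out) := by unfold Spec_binary_storage_fractions; infer_instance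

-- ===== CLAIM (what is proved, stated in full; the proofs are below) =====
def Claim_equal_binary_storage_fractions : Prop := ∀ (storage_bound : Int), Dom_binary_storage_fractions storage_bound → Spec_binary_storage_fractions storage_bound (binary_storage_fractions storage_bound)

-- ===== LEMMAS AND PROOFS =====

theorem pvLoopA_zero (fuel : Nat) (c : Int) : pvLoopA fuel 0 c = [] := by
  cases fuel <;> simp [pvLoopA]

-- A's loop in closed form: with current = c ≥ 1 and c·(2^k − 1) ≤ r < c·(2^(k+1) − 1),
-- the loop emits c, 2c, …, 2^(k−1)·c and then the positive remainder, if any.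
theorem pvLoopA_closed (k : Nat) : ∀ (fuel : Nat) (r c : Int), 1 ≤ c →
    c * (2 ^ k - 1) ≤ r → r < c * (2 ^ (k + 1) - 1) → r.toNat < fuel →
    pvLoopA fuel r c =
      (List.range k).map (fun i => c * 2 ^ i) ++
        (if r - c * (2 ^ k - 1) > 0 then [r - c * (2 ^ k - 1)] else []) := by
  induction k with
  | zero =>
    intro fuel r c hc _ hub hfuel
    simp only [pow_zero] at *
    obtain ⟨fuel, rfl⟩ : ∃ f, fuel = f + 1 := ⟨fuel - 1, by omega⟩
    by_cases hr : r > 0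
    · have hmin : min c r = r := by omega
      simp [pvLoopA, hr, hmin, pvLoopA_zero]
    · simp [pvLoopA, hr]
  | succ k ih =>
    intro fuel r c hc hlb hub hfuel
    have h2k : (1 : Int) ≤ 2 ^ k := one_le_pow₀ (by norm_num)
    have hpow : (2 : Int) ^ (k + 1) = 2 ^ k * 2 := by ring
    have hrc : c ≤ r := by nlinarith
    have hr : r > 0 := by omega
    obtain ⟨fuel, rfl⟩ : ∃ f, fuel = f + 1 := ⟨fuel - 1, by omega⟩
    have hmin : min c r = c := by omega
    have hrec := ih fuel (r - c) (c * 2) (by omega)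
      (by rw [hpow] at hlb; nlinarith)
      (by have e : (2:Int) ^ (k + 1 + 1) = 2 ^ (k+1) * 2 := by ring
          rw [e] at hub; linarith)
      (by omega)
    simp only [pvLoopA, hr, if_pos, hmin]
    rw [hrec, List.range_succ_eq_map]
    simp only [List.map_cons, List.map_map, pow_zero, mul_one, List.cons_append]
    congr 2
    · apply List.map_congr_left
      intro i _
      simp [Function.comp, pow_succ]
      ring
    · have : r - c - c * 2 * (2 ^ k - 1) = r - c * (2 ^ (k + 1) - 1) := by
        rw [hpow]; ring
      rw [this]

theorem nat_log2_spec (m : Nat) (hm : 1 ≤ m) : 2 ^ Nat.log2 m ≤ m ∧ m < 2 ^ (Nat.log2 m + 1) :=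
  ⟨Nat.log2_self_le (by omega), Nat.lt_log2_self⟩

-- ===== VERDICT (by name: the statement is the Claim_ definition above) =====
theorem binary_storage_fractions_spec : Claim_equal_binary_storage_fractions := by
  intro n _
  unfold Spec_binary_storage_fractions binary_storage_fractions binary_storage_fractions_alt
  by_cases hn : n ≤ 0
  · have : ¬ n > 0 := by omega
    simp [pvLoopA, hn, this]
  · push Not at hn
    simp only [if_neg (by omega : ¬ n ≤ 0)]
    have hpos : ¬ (n + 1 ≤ 0) := by omega
    have hk : pvBitLength (n + 1) - 1 = Nat.log2 (n + 1).toNat := by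
      simp [pvBitLength, hpos]
    set k := Nat.log2 (n + 1).toNat with hkdef
    obtain ⟨hlo, hhi⟩ := nat_log2_spec (n + 1).toNat (by omega)
    have hn1 : (((n + 1).toNat : Int)) = n + 1 := Int.toNat_of_nonneg (by omega)
    have hloI : (2 : Int) ^ k ≤ n + 1 := by rw [← hn1]; exact_mod_cast hlo
    have hhiI : n + 1 < (2 : Int) ^ (k + 1) := by rw [← hn1]; exact_mod_cast hhi
    rw [hk]
    have := pvLoopA_closed k (n.toNat + 1) n 1 (le_refl 1)
      (by omega) (by omega) (by omega)
    simp only [one_mul] at this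
    rw [this]
    split_ifs <;> simp
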